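-- pv_equiv track=rewrite | github.com/choace0427/sellscale-backend | src/utils/string/string_utils.py | has_consecutive_uppercase_string
-- ===== SOURCE A (Python) =====
-- def has_consecutive_uppercase_string(st, num_consecutive):
--     """
--     Returns True if s contains a consecutive substring of length >= num_consecutive that is all uppercase.
--     Otherwise, returns False.
--     """
--     consecutive_uppercase_count = 0
--     consecutive_string = ""
--
--     longest_consecutive_string = ""
--     longest_consecutive_uppercase_count = 0
--     for i in range(len(st)):
--         if st[i].isupper() or st[i].isspace():
--             if st[i].isupper():
--                 consecutive_uppercase_count += 1
--                 consecutive_string = consecutive_string + st[i]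
--                 if longest_consecutive_uppercase_count < consecutive_uppercase_count:
--                     longest_consecutive_uppercase_count = consecutive_uppercase_count
--                     longest_consecutive_string = consecutive_string
--             elif consecutive_uppercase_count > 0:
--                 consecutive_string = consecutive_string + st[i]
--         else:
--             consecutive_uppercase_count = 0
--             consecutive_string = ""
--
--     if longest_consecutive_uppercase_count >= num_consecutive:
--         return True, longest_consecutive_string
--     return False, None
-- ===== SOURCE B (Python) =====
-- def has_consecutive_uppercase_string(st, num_consecutive):
--     # Simpler decomposition: segment the string into maximal runs of
--     # uppercase/space chars, score each run by its uppercase count, keep the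
--     # first best run stripped of surrounding whitespace.
--     best_count = 0
--     best_string = ""
--     i = 0
--     n = len(st)
--     while i < n:
--         if not (st[i].isupper() or st[i].isspace()):
--             i += 1
--             continue
--         j = i
--         while j < n and (st[j].isupper() or st[j].isspace()):
--             j += 1
--         seg = st[i:j]
--         k = sum(1 for c in seg if c.isupper())
--         if k > best_count:
--             best_count = k
--             best_string = seg.strip()
--         i = j
--     if best_count >= num_consecutive:
--         return True, best_string
--     return False, None
-- ===== Notes on version B (the rewrite author's own statement) =====
-- stated objective: simpler
-- what changed: A threads four pieces of running state (current run count/string, best count/string) through a char-by-char fold; B instead segments the string into maximal uppercase/space runs, scores each run by its uppercase count once, and keeps the first best run stripped of surrounding whitespace.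
import Mathlib
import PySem

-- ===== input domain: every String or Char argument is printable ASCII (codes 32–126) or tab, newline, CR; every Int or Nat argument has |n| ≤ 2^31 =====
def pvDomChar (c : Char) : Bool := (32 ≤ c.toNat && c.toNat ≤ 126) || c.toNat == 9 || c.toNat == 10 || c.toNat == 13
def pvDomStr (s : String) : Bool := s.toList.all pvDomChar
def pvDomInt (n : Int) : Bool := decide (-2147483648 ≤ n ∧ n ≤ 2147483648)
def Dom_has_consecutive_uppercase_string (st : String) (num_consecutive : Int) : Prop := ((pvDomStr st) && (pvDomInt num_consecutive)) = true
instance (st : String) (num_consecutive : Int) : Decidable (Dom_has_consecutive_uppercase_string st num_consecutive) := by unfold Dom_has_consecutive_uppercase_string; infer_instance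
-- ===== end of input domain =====

-- B replaces A's single fold with running state by a segmentation of the string into
-- maximal uppercase/space runs scored per run (objective: simpler decomposition).


-- `c.isupper() or c.isspace()` — the test both Pythons write literally
def pvOk (c : Char) : Bool := PySem.Chars.isupper c || PySem.Chars.isspace c

-- ===== PORT A =====
-- state: (consecutive_uppercase_count, consecutive_string, longest_count, longest_string)
def stepA (s : Nat × List Char × Nat × List Char) (c : Char) : Nat × List Char × Nat × List Char :=
  if pvOk c then
    if PySem.Chars.isupper c then
      let cc := s.1 + 1
      let cs := s.2.1 ++ [c]
      if s.2.2.1 < cc then (cc, cs, cc, cs) else (cc, cs, s.2.2.1, s.2.2.2)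
    else if 0 < s.1 then (s.1, s.2.1 ++ [c], s.2.2.1, s.2.2.2)
    else s
  else (0, [], s.2.2.1, s.2.2.2)

def has_consecutive_uppercase_string (st : String) (num_consecutive : Int) : Bool × Option String :=
  let s := st.toList.foldl stepA (0, [], 0, [])
  if (s.2.2.1 : Int) ≥ num_consecutive then (true, some (String.ofList s.2.2.2))
  else (false, none)

-- ===== PORT B =====
-- B's while loop: skip a separator char, or consume a whole maximal pvOk-run at once
def altLoop : List Char → Nat → List Char → Nat × List Char
  | [], bc, bs => (bc, bs)
  | c :: rest, bc, bs =>
    if pvOk c then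
      let seg := List.takeWhile pvOk (c :: rest)
      let k := seg.countP PySem.Chars.isupper
      if bc < k then altLoop (List.dropWhile pvOk (c :: rest)) k (PySem.Chars.strip seg)
      else altLoop (List.dropWhile pvOk (c :: rest)) bc bs
    else altLoop rest bc bs
termination_by l => l.length
decreasing_by
  · simp only [List.dropWhile_cons, ‹pvOk c = true›, if_true, List.length_cons]
    exact Nat.lt_succ_of_le (List.length_dropWhile_le pvOk rest)
  · simp only [List.dropWhile_cons, ‹pvOk c = true›, if_true, List.length_cons]
    exact Nat.lt_succ_of_le (List.length_dropWhile_le pvOk rest)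
  · simp

def has_consecutive_uppercase_string_alt (st : String) (num_consecutive : Int) : Bool × Option String :=
  let r := altLoop st.toList 0 []
  if (r.1 : Int) ≥ num_consecutive then (true, some (String.ofList r.2))
  else (false, none)

-- ===== PRECONDITION & SPEC =====
def Spec_has_consecutive_uppercase_string (st : String) (num_consecutive : Int) (out : Bool × Option String) : Prop := out = has_consecutive_uppercase_string_alt st num_consecutive
instance (st : String) (num_consecutive : Int) (out : Bool × Option String) : Decidable (Spec_has_consecutive_uppercase_string st num_consecutive out) := by unfold Spec_has_consecutive_uppercase_string; infer_instance

-- ===== CLAIM (what is proved, stated in full; the proofs are below) =====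
def Claim_equal_has_consecutive_uppercase_string : Prop := ∀ (st : String) (num_consecutive : Int), Dom_has_consecutive_uppercase_string st num_consecutive → Spec_has_consecutive_uppercase_string st num_consecutive (has_consecutive_uppercase_string st num_consecutive)

-- ===== LEMMAS AND PROOFS =====

-- an upper-case char is not a space
lemma upper_not_space {c : Char} (h : PySem.Chars.isupper c = true) :
    PySem.Chars.isspace c = false := by
  simp only [PySem.Chars.isupper, decide_eq_true_eq, Bool.and_eq_true] at h
  have h1 : 65 ≤ c.toNat := h.1
  have h2 : c.toNat ≤ 90 := h.2
  simp only [PySem.Chars.isspace, Bool.or_eq_false_iff, Bool.and_eq_false_iff,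
    decide_eq_false_iff_not]
  omega

-- a pvOk char that is not upper is a space
lemma ok_not_upper_space {c : Char} (h : pvOk c = true)
    (hu : PySem.Chars.isupper c = false) : PySem.Chars.isspace c = true := by
  simp only [pvOk, Bool.or_eq_true] at h
  rcases h with h | h
  · rw [hu] at h; exact absurd h (by simp)
  · exact h

-- dropping space chars does not change the upper-count
lemma countP_dropWhile_space (l : List Char) :
    (l.dropWhile PySem.Chars.isspace).countP PySem.Chars.isupper
      = l.countP PySem.Chars.isupper := by
  induction l with
  | nil => simp
  | cons c t ih =>
    by_cases hs : PySem.Chars.isspace c = true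
    · have hu : PySem.Chars.isupper c = false := by
        by_contra h
        have := upper_not_space (c := c) (by simpa using h)
        rw [this] at hs; exact absurd hs (by simp)
      simp [hs, ih, List.countP_cons, hu]
    · simp [hs]

lemma countP_rstrip (l : List Char) :
    (PySem.Chars.rstrip l).countP PySem.Chars.isupper = l.countP PySem.Chars.isupper := by
  simp only [PySem.Chars.rstrip]
  rw [List.countP_reverse, countP_dropWhile_space, List.countP_reverse]

-- a run of ok chars with no upper char is all spaces, so its rstrip is empty
lemma rstrip_eq_nil_of_no_upper {l : List Char} (hok : ∀ c ∈ l, pvOk c = true)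
    (h : l.countP PySem.Chars.isupper = 0) : PySem.Chars.rstrip l = [] := by
  have hall : ∀ c ∈ l, PySem.Chars.isspace c = true := by
    intro c hc
    have hu : PySem.Chars.isupper c = false := by
      by_contra hcu
      have : 0 < l.countP PySem.Chars.isupper :=
        List.countP_pos_iff.mpr ⟨c, hc, by simpa using hcu⟩
      omega
    exact ok_not_upper_space (hok c hc) hu
  simp only [PySem.Chars.rstrip]
  have : l.reverse.dropWhile PySem.Chars.isspace = [] := by
    apply List.dropWhile_eq_nil_iff.mpr
    intro c hc
    exact hall c (List.mem_reverse.mp hc)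
  simp [this]

-- rstrip commutes with a cons whose tail keeps an upper char (rstrip tail ≠ [])
lemma rstrip_cons_of_ne {c : Char} {l : List Char} (h : PySem.Chars.rstrip l ≠ []) :
    PySem.Chars.rstrip (c :: l) = c :: PySem.Chars.rstrip l := by
  simp only [PySem.Chars.rstrip] at *
  have hne : l.reverse.dropWhile PySem.Chars.isspace ≠ [] := by
    intro hx; exact h (by simp [hx])
  rw [List.reverse_cons, List.dropWhile_append]
  simp [List.isEmpty_iff, hne]

lemma rstrip_cons_of_not_space {c : Char} {l : List Char}
    (hc : PySem.Chars.isspace c = false) :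
    PySem.Chars.rstrip (c :: l) = c :: PySem.Chars.rstrip l := by
  simp only [PySem.Chars.rstrip]
  rw [List.reverse_cons, List.dropWhile_append]
  by_cases hx : l.reverse.dropWhile PySem.Chars.isspace = []
  · simp [hx, hc]
  · simp [List.isEmpty_iff, hx]

-- strip of an all-ok run: the lstrip adds nothing new
lemma strip_eq_rstrip_lstrip (l : List Char) :
    PySem.Chars.strip l = PySem.Chars.rstrip (l.dropWhile PySem.Chars.isspace) := rfl

-- ===== per-segment lemma =====
-- folding A's step over a run of pvOk chars, from any state with cc ≤ lc
lemma foldA_seg (seg : List Char) : ∀ (cc : Nat) (cs : List Char) (lc : Nat) (lcs : List Char),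
    (∀ c ∈ seg, pvOk c = true) → cc ≤ lc →
    seg.foldl stepA (cc, cs, lc, lcs) =
      (cc + seg.countP PySem.Chars.isupper,
       cs ++ (if 0 < cc then seg else seg.dropWhile PySem.Chars.isspace),
       max lc (cc + seg.countP PySem.Chars.isupper),
       if lc < cc + seg.countP PySem.Chars.isupper then
         cs ++ (if 0 < cc then PySem.Chars.rstrip seg else PySem.Chars.strip seg)
       else lcs) := by
  induction seg with
  | nil =>
    intro cc cs lc lcs _ hle
    simp only [List.foldl_nil, List.countP_nil, List.dropWhile_nil, Prod.mk.injEq]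
    refine ⟨by omega, by by_cases hcc : 0 < cc <;> simp [hcc], by omega, ?_⟩
    rw [if_neg (by omega)]
  | cons c t ih =>
    intro cc cs lc lcs hok hle
    have hokc : pvOk c = true := hok c (by simp)
    have hokt : ∀ x ∈ t, pvOk x = true := fun x hx => hok x (by simp [hx])
    by_cases hu : PySem.Chars.isupper c = true
    · -- uppercase char
      have hns : PySem.Chars.isspace c = false := upper_not_space hu
      have hstep : stepA (cc, cs, lc, lcs) c =
          (cc + 1, cs ++ [c], max lc (cc + 1),
           if lc < cc + 1 then cs ++ [c] else lcs) := by
        simp only [stepA, hokc, hu, if_true]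
        by_cases hlt : lc < cc + 1 <;> simp [hlt] <;> omega
      rw [List.foldl_cons, hstep,
        ih (cc + 1) (cs ++ [c]) (max lc (cc + 1))
          (if lc < cc + 1 then cs ++ [c] else lcs) hokt (le_max_right _ _)]
      simp only [Prod.mk.injEq]
      have hcount : (c :: t).countP PySem.Chars.isupper = t.countP PySem.Chars.isupper + 1 := by
        simp [List.countP_cons, hu]
      refine ⟨by omega, ?_, by omega, ?_⟩
      · -- consecutive_string component
        have hdw : (c :: t).dropWhile PySem.Chars.isspace = c :: t := by
          simp [List.dropWhile_cons, hns]
        by_cases hcc : 0 < cc <;> simp [hcc, hdw]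
      · -- longest_string component
        have hstripc : PySem.Chars.strip (c :: t) = c :: PySem.Chars.rstrip t := by
          rw [strip_eq_rstrip_lstrip]
          simp [List.dropWhile_cons, hns, rstrip_cons_of_not_space hns]
        have hrc : PySem.Chars.rstrip (c :: t) = c :: PySem.Chars.rstrip t :=
          rstrip_cons_of_not_space hns
        by_cases ht0 : t.countP PySem.Chars.isupper = 0
        · have hrt : PySem.Chars.rstrip t = [] := rstrip_eq_nil_of_no_upper hokt ht0
          have hc1 : ¬ (max lc (cc + 1) < cc + 1 + t.countP PySem.Chars.isupper) := by omega
          rw [if_neg hc1]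
          rw [hcount]
          by_cases hlt : lc < cc + 1
          · rw [if_pos hlt, if_pos (by omega)]
            by_cases hcc : 0 < cc <;> simp [hcc, hrc, hstripc, hrt]
          · rw [if_neg hlt, if_neg (by omega)]
        · have hc1 : (max lc (cc + 1) < cc + 1 + t.countP PySem.Chars.isupper)
              ↔ (lc < cc + (c :: t).countP PySem.Chars.isupper) := by
            rw [hcount]; omega
          by_cases hcond : lc < cc + (c :: t).countP PySem.Chars.isupper
          · rw [if_pos (hc1.mpr hcond), if_pos hcond]
            by_cases hcc : 0 < cc <;> simp [hcc, hrc, hstripc]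
          · rw [if_neg (fun h => hcond (hc1.mp h)), if_neg hcond]
            rw [hcount] at hcond
            rw [if_neg (by omega)]
    · -- space char
      have huf : PySem.Chars.isupper c = false := by simpa using hu
      have hs : PySem.Chars.isspace c = true := ok_not_upper_space hokc huf
      have hcount : (c :: t).countP PySem.Chars.isupper = t.countP PySem.Chars.isupper := by
        simp [List.countP_cons, huf]
      by_cases hcc : 0 < cc
      · have hstep : stepA (cc, cs, lc, lcs) c = (cc, cs ++ [c], lc, lcs) := by
          simp [stepA, hokc, hu, hcc]
        rw [List.foldl_cons, hstep, ih cc (cs ++ [c]) lc lcs hokt hle]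
        simp only [Prod.mk.injEq]
        refine ⟨by omega, by simp [hcc], by omega, ?_⟩
        rw [hcount]
        by_cases ht0 : t.countP PySem.Chars.isupper = 0
        · rw [if_neg (by omega), if_neg (by omega)]
        · have hrt : PySem.Chars.rstrip t ≠ [] := by
            intro hx
            have := countP_rstrip t
            rw [hx] at this
            simp at this
            omega
          by_cases hcond : lc < cc + t.countP PySem.Chars.isupper
          · rw [if_pos hcond, if_pos hcond]
            simp [hcc, rstrip_cons_of_ne hrt]
          · rw [if_neg hcond, if_neg hcond]
      · have hcc0 : cc = 0 := by omega
        have hstep : stepA (cc, cs, lc, lcs) c = (cc, cs, lc, lcs) := by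
          simp [stepA, hokc, hu, hcc]
        rw [List.foldl_cons, hstep, ih cc cs lc lcs hokt hle]
        simp only [Prod.mk.injEq]
        refine ⟨by omega, ?_, by omega, ?_⟩
        · simp [hcc, hs]
        · rw [hcount]
          have hstripc : PySem.Chars.strip (c :: t) = PySem.Chars.strip t := by
            rw [strip_eq_rstrip_lstrip, strip_eq_rstrip_lstrip]
            simp [hs]
          by_cases hcond : lc < cc + t.countP PySem.Chars.isupper
          · rw [if_pos hcond, if_pos hcond]; simp [hcc, hstripc]
          · rw [if_neg hcond, if_neg hcond]

-- ===== whole-string lemma =====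
-- the head of a non-empty dropWhile fails the predicate
lemma dropWhile_head_false {p : Char → Bool} : ∀ {l : List Char} {d : Char} {t : List Char},
    List.dropWhile p l = d :: t → p d = false := by
  intro l
  induction l with
  | nil => intro d t h; simp at h
  | cons c r ih =>
    intro d t h
    by_cases hc : p c = true
    · rw [List.dropWhile_cons, if_pos hc] at h; exact ih h
    · rw [List.dropWhile_cons, if_neg hc] at h
      cases h; simpa using hc

lemma foldA_eq_altLoop_fuel : ∀ (n : Nat) (l : List Char), l.length ≤ n → ∀ (bc : Nat) (bs : List Char),
    (l.foldl stepA (0, [], bc, bs)).2.2 = altLoop l bc bs := by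
  intro n
  induction n with
  | zero =>
    intro l hl bc bs
    have : l = [] := List.eq_nil_of_length_eq_zero (by omega)
    subst this; simp [altLoop]
  | succ m ih =>
    intro l hl bc bs
    match l with
    | [] => simp [altLoop]
    | c :: rest =>
      by_cases hokc : pvOk c = true
      · -- a maximal ok-run starts here
        have hseg : ∀ x ∈ List.takeWhile pvOk (c :: rest), pvOk x = true :=
          fun x hx => List.mem_takeWhile_imp hx
        have hsplit : (c :: rest) = List.takeWhile pvOk (c :: rest) ++ List.dropWhile pvOk (c :: rest) :=
          (List.takeWhile_append_dropWhile (p := pvOk) (l := c :: rest)).symm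
        set seg := List.takeWhile pvOk (c :: rest) with hsegdef
        have hfold : (c :: rest).foldl stepA (0, [], bc, bs)
            = (List.dropWhile pvOk (c :: rest)).foldl stepA
                (seg.countP PySem.Chars.isupper,
                 seg.dropWhile PySem.Chars.isspace,
                 max bc (seg.countP PySem.Chars.isupper),
                 if bc < seg.countP PySem.Chars.isupper then PySem.Chars.strip seg else bs) := by
          conv_lhs => rw [hsplit]
          rw [List.foldl_append, foldA_seg seg 0 [] bc bs hseg (Nat.zero_le _)]
          simp only [Nat.zero_add, List.nil_append]
          rw [if_neg (lt_irrefl 0), if_neg (lt_irrefl 0)]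
        rw [hfold, altLoop]
        simp only [hokc, if_true, ← hsegdef]
        have hlen : (List.dropWhile pvOk (c :: rest)).length ≤ rest.length := by
          rw [List.dropWhile_cons, if_pos hokc]
          exact List.length_dropWhile_le pvOk rest
        set k := seg.countP PySem.Chars.isupper with hkdef
        match hdw : List.dropWhile pvOk (c :: rest) with
        | [] =>
          simp only [List.foldl_nil, altLoop]
          by_cases hbk : bc < k
          · simp [hbk, Nat.max_eq_right (Nat.le_of_lt hbk)]
          · simp [hbk, Nat.max_eq_left (Nat.le_of_not_lt hbk)]
        | d :: t =>
          have hd : pvOk d = false := dropWhile_head_false hdw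
          have hstep : ∀ (cc : Nat) (cs : List Char) (lc : Nat) (lcs : List Char),
              stepA (cc, cs, lc, lcs) d = (0, [], lc, lcs) := by
            intro cc cs lc lcs; simp [stepA, hd]
          rw [List.foldl_cons, hstep]
          have hlen2 : t.length ≤ m := by
            rw [hdw] at hlen
            simp only [List.length_cons] at hlen hl
            omega
          rw [ih t hlen2]
          by_cases hbk : bc < k
          · simp only [hbk, if_true, altLoop, hd]
            rw [Nat.max_eq_right (Nat.le_of_lt hbk)]
            simp
          · simp only [hbk, if_false, altLoop, hd]
            rw [Nat.max_eq_left (Nat.le_of_not_lt hbk)]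
            simp
      · -- separator: both sides just skip the char
        have hstep : stepA (0, [], bc, bs) c = (0, [], bc, bs) := by
          simp [stepA, hokc]
        rw [List.foldl_cons, hstep, altLoop]
        simp only [hokc]
        exact ih rest (by simpa using Nat.lt_succ_iff.mp (by simpa using hl)) bc bs

-- ===== VERDICT (by name: the statement is the Claim_ definition above) =====
theorem has_consecutive_uppercase_string_spec : Claim_equal_has_consecutive_uppercase_string := by
  intro st n _
  unfold Spec_has_consecutive_uppercase_string
  unfold has_consecutive_uppercase_string has_consecutive_uppercase_string_alt
  dsimp only
  rw [show (st.toList.foldl stepA (0, [], 0, [])).2.2 = altLoop st.toList 0 [] from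
    foldA_eq_altLoop_fuel st.toList.length st.toList le_rfl 0 []]
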